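-- pv_equiv track=rewrite | github.com/finnickniu/LERP | case_study_text_event.py | detoeken
-- ===== SOURCE A (Python) =====
-- def is_subtoken(word):
--     if word[:2] == "##":
--         return True
--     else:
--         return False
--
-- def detoeken(tokens):
--     restored_text = []
--     for i in range(len(tokens)):
--
--         if not is_subtoken(tokens[i]):
--           restored_text.append(tokens[i])
--           n = 1
--           while True:
--             if (i+n) < len(tokens) and  is_subtoken(tokens[i+n]):
--                 restored_text[-1] = restored_text[-1] + tokens[i+n][2:]
--             else:
--                 break
--             n += 1
--     return restored_text
-- ===== SOURCE B (Python) =====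
-- def is_subtoken(word):
--     if word[:2] == "##":
--         return True
--     else:
--         return False
--
-- def detoeken(tokens):
--     restored_text = []
--     for word in tokens:
--         if is_subtoken(word):
--             if restored_text:
--                 restored_text[-1] = restored_text[-1] + word[2:]
--         else:
--             restored_text.append(word)
--     return restored_text
-- ===== Notes on version B (the rewrite author's own statement) =====
-- stated objective: simpler
-- what changed: Replaces the index-based outer loop with a nested look-ahead while over range(len(tokens)) by a single flat pass over the tokens: each subtoken is merged into the last emitted word (or dropped when none exists yet), each base token is appended.
import Mathlib
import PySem

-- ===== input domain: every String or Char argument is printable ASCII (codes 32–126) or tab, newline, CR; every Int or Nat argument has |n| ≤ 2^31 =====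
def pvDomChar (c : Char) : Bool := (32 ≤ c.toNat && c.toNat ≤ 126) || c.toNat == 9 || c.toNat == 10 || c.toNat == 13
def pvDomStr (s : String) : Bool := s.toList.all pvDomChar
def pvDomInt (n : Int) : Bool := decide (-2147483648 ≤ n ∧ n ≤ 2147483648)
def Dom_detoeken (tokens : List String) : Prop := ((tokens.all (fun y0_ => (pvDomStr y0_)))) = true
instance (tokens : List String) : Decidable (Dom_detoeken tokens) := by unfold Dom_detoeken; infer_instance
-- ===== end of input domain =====

-- B replaces A's outer index loop + inner look-ahead while by a single flat pass
-- over the tokens (simpler decomposition; same result).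


-- ===== PORT A =====
-- is_subtoken(word): word[:2] == "##"
def isSubtoken (word : String) : Bool :=
  if PySem.List.slice word.toList none (some 2) = ['#', '#'] then true else false

-- restored_text[-1] = restored_text[-1] + s : update of the last element
-- (both Pythons only execute it when the list is non-empty, where this is exact)
def updLast (acc : List String) (s : String) : List String :=
  acc.dropLast ++ [acc.getLast! ++ s]

-- tokens[i+n][2:]
def tail2 (w : String) : String := String.ofList (PySem.List.slice w.toList (some 2) none)

-- the inner  while True:  look-ahead loop (state: restored_text; counter n)
def detoekenLoopW (tokens : List String) (i n : Nat) (acc : List String) : List String :=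
  if _h : i + n < tokens.length ∧ isSubtoken (tokens.getD (i + n) "") then
    detoekenLoopW tokens i (n + 1) (updLast acc (tail2 (tokens.getD (i + n) "")))
  else acc
termination_by tokens.length - (i + n)
decreasing_by omega

-- the outer  for i in range(len(tokens))  loop; tokens[i] with 0 ≤ i < len is exactly getD
def detoekenLoopA (tokens : List String) (i : Nat) (acc : List String) : List String :=
  if _h : i < tokens.length then
    if ¬ isSubtoken (tokens.getD i "") then
      detoekenLoopA tokens (i + 1) (detoekenLoopW tokens i 1 (acc ++ [tokens.getD i ""]))
    else
      detoekenLoopA tokens (i + 1) acc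
  else acc
termination_by tokens.length - i
decreasing_by all_goals omega

def detoeken (tokens : List String) : List String :=
  detoekenLoopA tokens 0 []

-- ===== PORT B =====
-- single flat pass:  for word in tokens
def detoekenLoopB : List String → List String → List String
  | [], acc => acc
  | w :: ws, acc =>
    if isSubtoken w then
      if ¬ acc.isEmpty then detoekenLoopB ws (updLast acc (tail2 w))
      else detoekenLoopB ws acc
    else detoekenLoopB ws (acc ++ [w])

def detoeken_alt (tokens : List String) : List String :=
  detoekenLoopB tokens []

-- ===== PRECONDITION & SPEC =====
def Spec_detoeken (tokens : List String) (out : List String) : Prop := out = detoeken_alt tokens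
instance (tokens : List String) (out : List String) : Decidable (Spec_detoeken tokens out) := by unfold Spec_detoeken; infer_instance

-- ===== CLAIM (what is proved, stated in full; the proofs are below) =====
def Claim_equal_detoeken : Prop := ∀ (tokens : List String), Dom_detoeken tokens → Spec_detoeken tokens (detoeken tokens)

-- ===== LEMMAS AND PROOFS =====

-- merge the run of subtokens starting at absolute index j into acc's last element
def mergeRun (tokens : List String) (j : Nat) (acc : List String) : List String :=
  if _h : j < tokens.length ∧ isSubtoken (tokens.getD j "") then
    mergeRun tokens (j + 1) (updLast acc (tail2 (tokens.getD j "")))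
  else acc
termination_by tokens.length - j
decreasing_by omega

theorem updLast_ne_nil (acc : List String) (s : String) : updLast acc s ≠ [] := by
  simp [updLast]

theorem loopW_eq_mergeRun (tokens : List String) (i n : Nat) (acc : List String) :
    detoekenLoopW tokens i n acc = mergeRun tokens (i + n) acc := by
  rw [detoekenLoopW, mergeRun]
  split
  · rw [loopW_eq_mergeRun tokens i (n + 1)]
    ring_nf
  · rfl
termination_by tokens.length - (i + n)
decreasing_by omega

theorem loopA_mergeRun_eq_loopB (tokens : List String) (j : Nat) (acc : List String)
    (hacc : acc ≠ []) :
    detoekenLoopA tokens j (mergeRun tokens j acc) = detoekenLoopB (tokens.drop j) acc := by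
  by_cases hj : j < tokens.length
  · have hdrop : tokens.drop j = tokens.getD j "" :: tokens.drop (j + 1) := by
      simp only [List.getD_eq_getElem?_getD, List.getElem?_eq_getElem hj, Option.getD_some]
      exact List.drop_eq_getElem_cons hj
    by_cases hs : isSubtoken (tokens.getD j "")
    · rw [mergeRun]; rw [dif_pos ⟨hj, hs⟩]
      rw [detoekenLoopA]; rw [dif_pos hj, if_neg (by revert hs; simp)]
      rw [loopA_mergeRun_eq_loopB tokens (j + 1) _ (updLast_ne_nil acc _)]
      rw [hdrop, detoekenLoopB, if_pos hs, if_pos (by simp [hacc])]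
    · rw [mergeRun]; rw [dif_neg (by tauto)]
      rw [detoekenLoopA]; rw [dif_pos hj, if_pos (by revert hs; simp)]
      rw [loopW_eq_mergeRun]
      rw [loopA_mergeRun_eq_loopB tokens (j + 1) _ (by simp)]
      rw [hdrop, detoekenLoopB, if_neg (by revert hs; simp)]
  · rw [mergeRun]; rw [dif_neg (by tauto)]
    rw [detoekenLoopA]; rw [dif_neg hj]
    rw [List.drop_eq_nil_of_le (by omega), detoekenLoopB]
termination_by tokens.length - j
decreasing_by all_goals omega

theorem loopA_nil_eq_loopB (tokens : List String) (j : Nat) :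
    detoekenLoopA tokens j [] = detoekenLoopB (tokens.drop j) [] := by
  by_cases hj : j < tokens.length
  · have hdrop : tokens.drop j = tokens.getD j "" :: tokens.drop (j + 1) := by
      simp only [List.getD_eq_getElem?_getD, List.getElem?_eq_getElem hj, Option.getD_some]
      exact List.drop_eq_getElem_cons hj
    by_cases hs : isSubtoken (tokens.getD j "")
    · rw [detoekenLoopA]; rw [dif_pos hj, if_neg (by revert hs; simp)]
      rw [loopA_nil_eq_loopB tokens (j + 1)]
      rw [hdrop, detoekenLoopB, if_pos hs, if_neg (by simp)]
    · rw [detoekenLoopA]; rw [dif_pos hj, if_pos (by revert hs; simp)]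
      rw [loopW_eq_mergeRun]
      rw [loopA_mergeRun_eq_loopB tokens (j + 1) _ (by simp)]
      rw [hdrop, detoekenLoopB, if_neg (by revert hs; simp)]
  · rw [detoekenLoopA]; rw [dif_neg hj]
    rw [List.drop_eq_nil_of_le (by omega), detoekenLoopB]
termination_by tokens.length - j
decreasing_by omega

-- ===== VERDICT (by name: the statement is the Claim_ definition above) =====
theorem detoeken_spec : Claim_equal_detoeken := by
  intro tokens _
  unfold Spec_detoeken detoeken detoeken_alt
  simpa using loopA_nil_eq_loopB tokens 0
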